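-- pv_equiv track=rewrite | github.com/vramirez/navigate-app | backend/news/services/rss_discovery.py | _select_primary_feed
-- ===== SOURCE A (Python) =====
-- from typing import List, Dict, Optional, Tuple
--
-- def _select_primary_feed(feeds: List[Dict]) -> Optional[Dict]:
--     """Select the primary/best RSS feed from discovered feeds"""
--     if not feeds:
--         return None
--
--     # Priority order for selection
--     priority_methods = ['html_head', 'common_location', 'cms_pattern', 'html_content']
--     priority_paths = ['/feed/', '/rss/', '/atom.xml']
--
--     # First, try to find feed by discovery method priority
--     for method in priority_methods:
--         for feed in feeds:
--             if feed.get('discovery_method') == method: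
--                 return feed
--
--     # Then by path priority
--     for path in priority_paths:
--         for feed in feeds:
--             if path in feed['url']:
--                 return feed
--
--     # Finally, just return the first one
--     return feeds[0]
-- ===== SOURCE B (Python) =====
-- def _select_primary_feed(feeds):
--     """Select the primary/best RSS feed from discovered feeds"""
--     if not feeds:
--         return None
--
--     # Single pass: keep the feed with the smallest method rank (first wins ties)
--     best = None
--     best_rank = 4
--     for feed in feeds:
--         r = _method_rank(feed.get('discovery_method'))
--         if r < best_rank:
--             best, best_rank = feed, r
--     if best is not None:
--         return best
--
--     # Path phase: first (path, feed) pair, in path-priority order, whose url matches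
--     for path, feed in ((p, f) for p in ('/feed/', '/rss/', '/atom.xml') for f in feeds):
--         if path in feed['url']:
--             return feed
--
--     return feeds[0]
--
--
-- def _method_rank(m):
--     if m == 'html_head':
--         return 0
--     if m == 'common_location':
--         return 1
--     if m == 'cms_pattern':
--         return 2
--     if m == 'html_content':
--         return 3
--     return 4
-- ===== Notes on version B (the rewrite author's own statement) =====
-- stated objective: alternative
-- what changed: B replaces A's four separate method-priority scans of the feed list by a single pass that tracks the feed with the smallest method rank (strict < keeps the first feed on ties), and replaces the path phase's nested loops by one scan over the path-by-feed pairs.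
import Mathlib
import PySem

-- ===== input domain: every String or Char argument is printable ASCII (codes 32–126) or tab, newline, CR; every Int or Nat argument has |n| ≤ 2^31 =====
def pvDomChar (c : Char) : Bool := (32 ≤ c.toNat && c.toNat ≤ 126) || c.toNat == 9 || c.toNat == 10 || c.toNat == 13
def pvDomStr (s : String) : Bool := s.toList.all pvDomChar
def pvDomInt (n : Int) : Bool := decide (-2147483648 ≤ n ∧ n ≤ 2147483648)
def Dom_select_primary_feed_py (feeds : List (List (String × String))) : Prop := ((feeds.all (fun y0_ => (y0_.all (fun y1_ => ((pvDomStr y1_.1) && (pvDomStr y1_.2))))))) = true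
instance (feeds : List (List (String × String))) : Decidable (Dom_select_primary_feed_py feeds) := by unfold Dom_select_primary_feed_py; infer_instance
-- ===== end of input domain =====

-- B replaces A's four method-priority scans over the feed list by one pass tracking the
-- best method rank, and the path phase's nested loops by one scan of the path×feed pairs
-- (objective: alternative decomposition; same return value, side-effect free).

-- ===== PORT A =====
-- inner loop 'for feed in feeds: if feed.get('discovery_method') == method: return feed'
def pvAFindMethod (method : String) : List (List (String × String)) → Option (List (String × String))
  | [] => none
  | f :: fs =>
      if (PySem.Dict.mk f).get? "discovery_method" == some method then some f
      else pvAFindMethod method fs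

-- outer loop 'for method in priority_methods'
def pvAMethodPhase (feeds : List (List (String × String))) : List String → Option (List (String × String))
  | [] => none
  | m :: ms =>
      match pvAFindMethod m feeds with
      | some f => some f
      | none => pvAMethodPhase feeds ms

-- inner loop 'for feed in feeds: if path in feed['url']: return feed'
-- outer 'none' = KeyError (feed without 'url'), 'some none' = loop finished without match
def pvAFindPath (path : String) : List (List (String × String)) → Option (Option (List (String × String)))
  | [] => some none
  | f :: fs =>
      match (PySem.Dict.mk f).get? "url" with
      | none => none
      | some u => if PySem.Str.isIn path u then some (some f) else pvAFindPath path fs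

-- outer loop 'for path in priority_paths'
def pvAPathPhase (feeds : List (List (String × String))) : List String → Option (Option (List (String × String)))
  | [] => some none
  | p :: ps =>
      match pvAFindPath p feeds with
      | none => none
      | some (some f) => some (some f)
      | some none => pvAPathPhase feeds ps

def select_primary_feed_py (feeds : List (List (String × String))) : Option (List (String × String)) :=
  if feeds.isEmpty then none
  else
    match pvAMethodPhase feeds ["html_head", "common_location", "cms_pattern", "html_content"] with
    | some f => some f
    | none =>
        match pvAPathPhase feeds ["/feed/", "/rss/", "/atom.xml"] with
        | none => none               -- Python raises KeyError here; excluded by Pre_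
        | some (some f) => some f
        | some none => PySem.List.pyGet? feeds 0   -- feeds[0]

-- ===== PORT B =====
-- Source B's _method_rank
def pvBRank (m : Option String) : Nat :=
  if m == some "html_head" then 0
  else if m == some "common_location" then 1
  else if m == some "cms_pattern" then 2
  else if m == some "html_content" then 3
  else 4

-- one step of B's single best-rank pass ('if r < best_rank: best, best_rank = feed, r')
def pvBStep (acc : Option (List (String × String)) × Nat) (f : List (String × String)) :
    Option (List (String × String)) × Nat :=
  if pvBRank ((PySem.Dict.mk f).get? "discovery_method") < acc.2 then
    (some f, pvBRank ((PySem.Dict.mk f).get? "discovery_method"))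
  else acc

-- B's single scan over the (path, feed) pairs; outer 'none' = KeyError on feed['url']
def pvBScan : List (String × List (String × String)) → Option (Option (List (String × String)))
  | [] => some none
  | (p, f) :: rest =>
      match (PySem.Dict.mk f).get? "url" with
      | none => none
      | some u => if PySem.Str.isIn p u then some (some f) else pvBScan rest

def select_primary_feed_py_alt (feeds : List (List (String × String))) : Option (List (String × String)) :=
  if feeds.isEmpty then none
  else
    match (feeds.foldl pvBStep (none, 4)).1 with
    | some f => some f
    | none =>
        match pvBScan ((["/feed/", "/rss/", "/atom.xml"] : List String).flatMap
            (fun p => feeds.map (fun f => (p, f)))) with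
        | none => none               -- Python raises KeyError here; excluded by Pre_
        | some (some f) => some f
        | some none => feeds.head?   -- feeds[0], feeds nonempty here

-- ===== PRECONDITION & SPEC =====
-- Pre_ excludes the inputs where the path phase can touch a feed without a 'url' key
-- (no feed matches a priority method and some feed lacks 'url'): Python A raises KeyError
-- on almost all of them; on the rare remainder (a '/feed/'-matching feed precedes the
-- keyless one) A returns a value that B matches anyway — see the cite in claim.json.
def Pre_select_primary_feed_py (feeds : List (List (String × String))) : Prop :=
  feeds = [] ∨
  (∃ f ∈ feeds, (PySem.Dict.mk f).get? "discovery_method" ∈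
      (["html_head", "common_location", "cms_pattern", "html_content"].map some)) ∨
  (∀ f ∈ feeds, ((PySem.Dict.mk f).get? "url").isSome)

instance (feeds : List (List (String × String))) : Decidable (Pre_select_primary_feed_py feeds) := by
  unfold Pre_select_primary_feed_py; infer_instance

def pvWitness_select_primary_feed_py : (List (List (String × String))) :=
  [[("url", "https://x/feed/")], [("discovery_method", "html_head"), ("url", "u")]]

def Spec_select_primary_feed_py (feeds : List (List (String × String))) (out : Option (List (String × String))) : Prop := out = select_primary_feed_py_alt feeds
instance (feeds : List (List (String × String))) (out : Option (List (String × String))) : Decidable (Spec_select_primary_feed_py feeds out) := by unfold Spec_select_primary_feed_py; infer_instance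

-- ===== CLAIM (what is proved, stated in full; the proofs are below) =====
def Claim_equal_select_primary_feed_py : Prop := ∀ (feeds : List (List (String × String))), Dom_select_primary_feed_py feeds → Pre_select_primary_feed_py feeds → Spec_select_primary_feed_py feeds (select_primary_feed_py feeds)

-- ===== LEMMAS AND PROOFS =====

-- abbreviations used only in the proofs
def pvMethods : List String := ["html_head", "common_location", "cms_pattern", "html_content"]
def pvG (feeds : List (List (String × String))) : Option (List (String × String)) × Nat :=
  feeds.foldl pvBStep (none, 4)
def pvMerge (a b : Option (List (String × String)) × Nat) : Option (List (String × String)) × Nat :=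
  if b.2 < a.2 then b else a

theorem pvBRank_le (m : Option String) : pvBRank m ≤ 4 := by
  unfold pvBRank; split_ifs <;> omega

-- the method predicate at index i is exactly 'rank = i'
theorem pvRank_iff (m : Option String) (i : Nat) (hi : i < 4) :
    (m == some (pvMethods.getD i "")) = decide (pvBRank m = i) := by
  unfold pvBRank pvMethods
  interval_cases i <;> (split_ifs with h₀ h₁ h₂ h₃ <;> simp_all)

theorem pvStep_merge (acc X : Option (List (String × String)) × Nat)
    (hacc : acc.2 ≤ 4) (f : List (String × String)) :
    pvMerge (pvBStep acc f) X = pvMerge acc (pvMerge (pvBStep (none, 4) f) X) := by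
  have hr := pvBRank_le ((PySem.Dict.mk f).get? "discovery_method")
  obtain ⟨a, n⟩ := acc
  obtain ⟨x, k⟩ := X
  simp only [pvBStep, pvMerge] at *
  split_ifs <;> first | rfl | omega

theorem pvFoldl_merge (fs : List (List (String × String)))
    (acc : Option (List (String × String)) × Nat) (hacc : acc.2 ≤ 4) :
    fs.foldl pvBStep acc = pvMerge acc (pvG fs) := by
  induction fs generalizing acc with
  | nil =>
      have h4 : ¬ ((4 : Nat) < acc.2) := by omega
      simp [pvG, pvMerge, h4]
  | cons f fs ih =>
      have hr := pvBRank_le ((PySem.Dict.mk f).get? "discovery_method")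
      have h1 : (pvBStep acc f).2 ≤ 4 := by
        simp only [pvBStep]; split_ifs
        · exact pvBRank_le _
        · exact hacc
      have h2 : (pvBStep (none, 4) f).2 ≤ 4 := by
        simp only [pvBStep]; split_ifs
        · exact pvBRank_le _
        · exact Nat.le_refl 4
      have e2 : pvG (f :: fs) = pvMerge (pvBStep (none, 4) f) (pvG fs) := by
        unfold pvG; rw [List.foldl_cons, ih _ h2]; rfl
      rw [List.foldl_cons, ih _ h1, e2]
      exact pvStep_merge acc (pvG fs) hacc f

-- characterization of B's single best-rank pass against A's per-method scans
theorem pvG_inv (fs : List (List (String × String))) :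
    ((pvG fs).1 = none → (pvG fs).2 = 4 ∧
        ∀ i < 4, pvAFindMethod (pvMethods.getD i "") fs = none) ∧
    (∀ b, (pvG fs).1 = some b → (pvG fs).2 < 4 ∧
        pvAFindMethod (pvMethods.getD (pvG fs).2 "") fs = some b ∧
        ∀ i < (pvG fs).2, pvAFindMethod (pvMethods.getD i "") fs = none) := by
  induction fs with
  | nil => simp [pvG, pvAFindMethod]
  | cons f fs ih =>
      obtain ⟨ihn, ihs⟩ := ih
      have h2s : (pvBStep (none, 4) f).2 ≤ 4 := by
        simp only [pvBStep]; split_ifs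
        · exact pvBRank_le _
        · exact Nat.le_refl 4
      have hstep : pvG (f :: fs) = pvMerge (pvBStep (none, 4) f) (pvG fs) := by
        unfold pvG
        rw [List.foldl_cons, pvFoldl_merge fs _ h2s]
        rfl
      have hY : pvBStep (none, 4) f =
          if pvBRank ((PySem.Dict.mk f).get? "discovery_method") < 4 then
            (some f, pvBRank ((PySem.Dict.mk f).get? "discovery_method"))
          else (none, 4) := by
        simp [pvBStep]
      have hcons : ∀ i, i < 4 → pvAFindMethod (pvMethods.getD i "") (f :: fs)
          = if pvBRank ((PySem.Dict.mk f).get? "discovery_method") = i then some f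
            else pvAFindMethod (pvMethods.getD i "") fs := by
        intro i hi
        simp only [pvAFindMethod]
        rw [pvRank_iff _ i hi]
        by_cases h : pvBRank ((PySem.Dict.mk f).get? "discovery_method") = i <;> simp [h]
      set r := pvBRank ((PySem.Dict.mk f).get? "discovery_method") with hrdef
      have hr4 : r ≤ 4 := pvBRank_le _
      rcases hX : pvG fs with ⟨xo, xk⟩
      cases xo with
      | none =>
          obtain ⟨hk4, hall⟩ := ihn (by rw [hX])
          rw [hX] at hk4; subst hk4
          by_cases hrlt : r < 4
          · have hG : pvG (f :: fs) = (some f, r) := by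
              rw [hstep, hX, hY]; simp [pvMerge, hrlt]; omega
            rw [hG]
            refine ⟨by simp, ?_⟩
            rintro b hb
            simp only [Option.some.injEq] at hb; subst hb
            refine ⟨hrlt, ?_, ?_⟩
            · rw [hcons r hrlt]; simp
            · intro i hi
              rw [hcons i (by omega)]
              simp only [if_neg (by omega : ¬ r = i)]
              exact hall i (by omega)
          · have hre : r = 4 := by omega
            have hG : pvG (f :: fs) = (none, 4) := by
              rw [hstep, hX, hY]; simp [pvMerge, hrlt]
            rw [hG]
            refine ⟨fun _ => ⟨rfl, ?_⟩, by simp⟩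
            intro i hi
            rw [hcons i hi, if_neg (by omega)]
            exact hall i hi
      | some b =>
          obtain ⟨hk4, hfind, hsmall⟩ := ihs b (by rw [hX])
          rw [hX] at hk4 hfind hsmall
          simp only at hk4 hfind hsmall
          by_cases hrlt : r < 4
          · by_cases hxr : xk < r
            · have hG : pvG (f :: fs) = (some b, xk) := by
                rw [hstep, hX, hY, if_pos hrlt]; simp [pvMerge, hxr]
              rw [hG]
              refine ⟨by simp, ?_⟩
              rintro b' hb'
              simp only [Option.some.injEq] at hb'; subst hb'
              refine ⟨by omega, ?_, ?_⟩
              · rw [hcons xk (by omega), if_neg (by omega)]; exact hfind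
              · intro i hi
                rw [hcons i (by omega), if_neg (by omega)]
                exact hsmall i hi
            · have hG : pvG (f :: fs) = (some f, r) := by
                rw [hstep, hX, hY, if_pos hrlt]; simp [pvMerge, hxr]
              rw [hG]
              refine ⟨by simp, ?_⟩
              rintro b' hb'
              simp only [Option.some.injEq] at hb'; subst hb'
              refine ⟨hrlt, ?_, ?_⟩
              · rw [hcons r hrlt]; simp
              · intro i hi
                rw [hcons i (by omega), if_neg (by omega)]
                exact hsmall i (by omega)
          · have hG : pvG (f :: fs) = (some b, xk) := by
              rw [hstep, hX, hY, if_neg hrlt]; simp [pvMerge, hk4]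
            rw [hG]
            refine ⟨by simp, ?_⟩
            rintro b' hb'
            simp only [Option.some.injEq] at hb'; subst hb'
            refine ⟨hk4, ?_, ?_⟩
            · rw [hcons xk (by omega), if_neg (by omega)]; exact hfind
            · intro i hi
              rw [hcons i (by omega), if_neg (by omega)]
              exact hsmall i hi

-- the one-pass result equals A's method phase
theorem pvMethod_eq (fs : List (List (String × String))) :
    (pvG fs).1 = pvAMethodPhase fs pvMethods := by
  obtain ⟨hn, hs⟩ := pvG_inv fs
  cases h : (pvG fs).1 with
  | none =>
      obtain ⟨-, hall⟩ := hn h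
      have h0 := hall 0 (by omega); have h1 := hall 1 (by omega)
      have h2 := hall 2 (by omega); have h3 := hall 3 (by omega)
      simp only [pvMethods, List.getD] at h0 h1 h2 h3
      simp at h0 h1 h2 h3
      simp [pvAMethodPhase, pvMethods, h0, h1, h2, h3]
  | some b =>
      obtain ⟨hlt, hfind, hsmall⟩ := hs b h
      have hv : (pvG fs).2 = 0 ∨ (pvG fs).2 = 1 ∨ (pvG fs).2 = 2 ∨ (pvG fs).2 = 3 := by omega
      rcases hv with hv | hv | hv | hv
      · rw [hv] at hfind
        simp [pvMethods, List.getD] at hfind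
        simp [pvAMethodPhase, pvMethods, hfind]
      · have e0 := hsmall 0 (by omega)
        rw [hv] at hfind
        simp [pvMethods, List.getD] at hfind e0
        simp [pvAMethodPhase, pvMethods, e0, hfind]
      · have e0 := hsmall 0 (by omega); have e1 := hsmall 1 (by omega)
        rw [hv] at hfind
        simp [pvMethods, List.getD] at hfind e0 e1
        simp [pvAMethodPhase, pvMethods, e0, e1, hfind]
      · have e0 := hsmall 0 (by omega); have e1 := hsmall 1 (by omega)
        have e2 := hsmall 2 (by omega)
        rw [hv] at hfind
        simp [pvMethods, List.getD] at hfind e0 e1 e2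
        simp [pvAMethodPhase, pvMethods, e0, e1, e2, hfind]

-- B's single product scan equals A's nested path loops
theorem pvScan_append (p : String) (fs : List (List (String × String)))
    (rest : List (String × List (String × String))) :
    pvBScan (fs.map (fun f => (p, f)) ++ rest) =
      match pvAFindPath p fs with
      | none => none
      | some (some f) => some (some f)
      | some none => pvBScan rest := by
  induction fs with
  | nil => simp [pvAFindPath]
  | cons f fs ih =>
      simp only [List.map_cons, List.cons_append, pvBScan, pvAFindPath]
      cases (PySem.Dict.mk f).get? "url" with
      | none => rfl
      | some u =>
          by_cases h : PySem.Str.isIn p u = true <;>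
            simp only [h, ih, if_true, if_false] <;> rfl

theorem pvPath_eq (fs : List (List (String × String))) (paths : List String) :
    pvBScan (paths.flatMap (fun p => fs.map (fun f => (p, f)))) = pvAPathPhase fs paths := by
  induction paths with
  | nil => simp [pvBScan, pvAPathPhase]
  | cons p ps ih =>
      simp only [List.flatMap_cons, pvAPathPhase]
      rw [pvScan_append]
      cases h : pvAFindPath p fs with
      | none => rfl
      | some o => cases o <;> simp [ih]

theorem pvHead_eq (fs : List (List (String × String))) (h : fs.isEmpty = false) :
    PySem.List.pyGet? fs (0 : Int) = fs.head? := by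
  cases fs with
  | nil => simp at h
  | cons f fs => simp [PySem.List.pyGet?, PySem.List.pyIdx?]

-- ===== VERDICT (by name: the statement is the Claim_ definition above) =====
theorem select_primary_feed_py_spec : Claim_equal_select_primary_feed_py := by
  intro feeds _ _
  unfold Spec_select_primary_feed_py select_primary_feed_py select_primary_feed_py_alt
  cases he : feeds.isEmpty with
  | true => simp
  | false =>
      simp only [Bool.false_eq_true, if_false]
      rw [show (["html_head", "common_location", "cms_pattern", "html_content"] : List String)
            = pvMethods from rfl,
          show feeds.foldl pvBStep (none, 4) = pvG feeds from rfl,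
          ← pvMethod_eq feeds,
          pvPath_eq feeds ["/feed/", "/rss/", "/atom.xml"],
          pvHead_eq feeds he]
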